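-- pv_equiv track=rewrite | github.com/we1yq/OR_sim_planner | k8s-extension-prototype/migrant_core/preserve.py | layout_score_vs_prev
-- ===== SOURCE A (Python) =====
-- def layout_score_vs_prev(
--     intervals: list[tuple[int, int, str]],
--     prev_intervals: list[tuple[int, int, str]],
-- ) -> tuple[int, int, int, int]:
--     exact = 0
--     prefix = 0
--     overlap_same_profile = 0
--
--     new_nonvoid = [(s, e, p) for (s, e, p) in intervals if p != "void"]
--     old_nonvoid = [(s, e, p) for (s, e, p) in prev_intervals if p != "void"]
--
--     for new_interval in new_nonvoid:
--         for old_interval in old_nonvoid: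
--             if new_interval == old_interval:
--                 exact += 1
--
--     for idx in range(min(len(new_nonvoid), len(old_nonvoid))):
--         if new_nonvoid[idx] == old_nonvoid[idx]:
--             prefix += 1
--
--     for s1, e1, p1 in new_nonvoid:
--         for s2, e2, p2 in old_nonvoid:
--             if p1 != p2:
--                 continue
--             overlap_same_profile += max(0, min(e1, e2) - max(s1, s2))
--
--     return (
--         int(exact),
--         int(len(new_nonvoid) == len(old_nonvoid)),
--         int(prefix),
--         int(overlap_same_profile),
--     )
-- ===== SOURCE B (Python) =====
-- def layout_score_vs_prev(
--     intervals: list[tuple[int, int, str]],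
--     prev_intervals: list[tuple[int, int, str]],
-- ) -> tuple[int, int, int, int]:
--     new_nonvoid = [t for t in intervals if t[2] != "void"]
--     old_nonvoid = [t for t in prev_intervals if t[2] != "void"]
--
--     # count each old interval once -> exact-match pairs without the nested scan
--     old_count = {}
--     for t in old_nonvoid:
--         old_count[t] = old_count.get(t, 0) + 1
--
--     # group old intervals by profile -> no profile test per (new, old) pair
--     by_profile = {}
--     for s, e, p in old_nonvoid:
--         by_profile.setdefault(p, []).append((s, e))
--
--     exact = sum(old_count.get(t, 0) for t in new_nonvoid)
--     prefix = sum(a == b for a, b in zip(new_nonvoid, old_nonvoid))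
--
--     overlap = 0
--     for s1, e1, p1 in new_nonvoid:
--         for s2, e2 in by_profile.get(p1, []):
--             ov = min(e1, e2) - max(s1, s2)
--             if ov > 0:
--                 overlap += ov
--
--     return (exact, int(len(new_nonvoid) == len(old_nonvoid)), prefix, overlap)
-- ===== Notes on version B (the rewrite author's own statement) =====
-- stated objective: faster
-- what changed: Replaces the O(n*m) nested scan for exact matches with a counting dict built in one pass over the old intervals, replaces the index loop for prefix matches with a zip, and groups old intervals by profile in a dict so the overlap loop only visits same-profile pairs instead of filtering every pair.
import Mathlib
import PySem

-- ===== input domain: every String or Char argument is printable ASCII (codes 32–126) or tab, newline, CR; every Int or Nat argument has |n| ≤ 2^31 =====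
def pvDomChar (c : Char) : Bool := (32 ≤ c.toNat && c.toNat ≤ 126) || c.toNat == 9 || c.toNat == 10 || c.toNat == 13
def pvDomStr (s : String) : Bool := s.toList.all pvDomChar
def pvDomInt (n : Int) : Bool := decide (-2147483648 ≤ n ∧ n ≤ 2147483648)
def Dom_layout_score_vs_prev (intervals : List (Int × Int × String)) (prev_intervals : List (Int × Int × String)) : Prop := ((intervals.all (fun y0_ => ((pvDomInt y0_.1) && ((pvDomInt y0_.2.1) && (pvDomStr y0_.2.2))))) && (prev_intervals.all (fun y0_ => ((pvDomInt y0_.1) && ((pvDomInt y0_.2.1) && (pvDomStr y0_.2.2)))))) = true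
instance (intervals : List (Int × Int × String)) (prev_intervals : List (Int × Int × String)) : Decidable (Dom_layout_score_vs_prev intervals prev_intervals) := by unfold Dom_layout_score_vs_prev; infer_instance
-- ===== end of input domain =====

-- B builds a counting dict once for exact-match pairs, uses zip for the prefix count, and groups
-- old intervals by profile so the overlap loop only visits same-profile pairs.

-- ===== PORT A =====
-- literal transliteration of A: list filters, two nested scans, an index loop over range(min len)
-- (indices produced by the loop are always in range, so the safe getElem? lookups never miss).
def layout_score_vs_prev (intervals : List (Int × Int × String)) (prev_intervals : List (Int × Int × String)) : Int × Int × Int × Int :=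
  let new_nonvoid := intervals.filter (fun t => t.2.2 != "void")
  let old_nonvoid := prev_intervals.filter (fun t => t.2.2 != "void")
  let exact : Int := new_nonvoid.foldl (fun acc ni =>
    old_nonvoid.foldl (fun acc oi => if ni == oi then acc + 1 else acc) acc) 0
  let pref : Int := (List.range (min new_nonvoid.length old_nonvoid.length)).foldl
    (fun acc idx => if new_nonvoid[idx]? = old_nonvoid[idx]? then acc + 1 else acc) 0
  let overlap : Int := new_nonvoid.foldl (fun acc t =>
    old_nonvoid.foldl (fun acc u =>
      if t.2.2 ≠ u.2.2 then acc
      else acc + max 0 (min t.2.1 u.2.1 - max t.1 u.1)) acc) 0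
  (exact, if new_nonvoid.length = old_nonvoid.length then 1 else 0, pref, overlap)

-- ===== PORT B =====
def layout_score_vs_prev_alt (intervals : List (Int × Int × String)) (prev_intervals : List (Int × Int × String)) : Int × Int × Int × Int :=
  let new_nonvoid := intervals.filter (fun t => t.2.2 != "void")
  let old_nonvoid := prev_intervals.filter (fun t => t.2.2 != "void")
  let old_count : PySem.Dict (Int × Int × String) Int :=
    old_nonvoid.foldl (fun d t => d.insert t (d.getD t 0 + 1)) PySem.Dict.empty
  let by_profile : PySem.Dict String (List (Int × Int)) :=
    old_nonvoid.foldl (fun d t => d.modify t.2.2 [] (· ++ [(t.1, t.2.1)])) PySem.Dict.empty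
  let exact : Int := new_nonvoid.foldl (fun acc t => acc + old_count.getD t 0) 0
  let pref : Int := (new_nonvoid.zip old_nonvoid).foldl
    (fun acc p => acc + (if p.1 = p.2 then 1 else 0)) 0
  let overlap : Int := new_nonvoid.foldl (fun acc t =>
    (by_profile.getD t.2.2 []).foldl (fun acc u =>
      let ov := min t.2.1 u.2 - max t.1 u.1
      if ov > 0 then acc + ov else acc) acc) 0
  (exact, if new_nonvoid.length = old_nonvoid.length then 1 else 0, pref, overlap)

-- ===== PRECONDITION & SPEC =====
def Spec_layout_score_vs_prev (intervals : List (Int × Int × String)) (prev_intervals : List (Int × Int × String)) (out : Int × Int × Int × Int) : Prop := out = layout_score_vs_prev_alt intervals prev_intervals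
instance (intervals : List (Int × Int × String)) (prev_intervals : List (Int × Int × String)) (out : Int × Int × Int × Int) : Decidable (Spec_layout_score_vs_prev intervals prev_intervals out) := by unfold Spec_layout_score_vs_prev; infer_instance

-- ===== CLAIM (what is proved, stated in full; the proofs are below) =====
def Claim_equal_layout_score_vs_prev : Prop := ∀ (intervals : List (Int × Int × String)) (prev_intervals : List (Int × Int × String)), Dom_layout_score_vs_prev intervals prev_intervals → Spec_layout_score_vs_prev intervals prev_intervals (layout_score_vs_prev intervals prev_intervals)

-- ===== LEMMAS AND PROOFS =====

-- exact: A's inner scan over old equals adding old.count ni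
lemma exact_inner (old : List (Int × Int × String)) (ni : Int × Int × String) (acc : Int) :
    old.foldl (fun acc oi => if ni == oi then acc + 1 else acc) acc = acc + old.count ni := by
  induction old generalizing acc with
  | nil => simp
  | cons h t ih =>
    simp only [List.foldl_cons, List.count_cons, ih]
    by_cases hv : ni = h
    · simp only [hv, BEq.rfl, if_pos]
      push_cast
      omega
    · have h1 : (ni == h) = false := by simp [hv]
      have h2 : (h == ni) = false := by simp [Ne.symm hv]
      simp only [h1, h2, Bool.false_eq_true, if_false]
      push_cast
      omega

-- prefix: A's index loop over range(min len) equals B's fold over the zip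
lemma prefix_eq (n o : List (Int × Int × String)) (c : Int) :
    (List.range (min n.length o.length)).foldl
      (fun acc idx => if n[idx]? = o[idx]? then acc + 1 else acc) c
    = (n.zip o).foldl (fun acc p => acc + (if p.1 = p.2 then 1 else 0)) c := by
  induction n generalizing o c with
  | nil => simp
  | cons a n' ih =>
    cases o with
    | nil => simp
    | cons b o' =>
      have hmin : min (a :: n').length (b :: o').length = min n'.length o'.length + 1 := by
        simp only [List.length_cons]; omega
      rw [hmin, List.range_succ_eq_map, List.foldl_cons, List.foldl_map]
      simp only [List.getElem?_cons_zero, List.getElem?_cons_succ, List.zip_cons_cons,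
        List.foldl_cons, Option.some_inj]
      have hst : (if a = b then c + 1 else c) = c + (if a = b then (1 : Int) else 0) := by
        split <;> omega
      rw [hst]
      exact ih o' _

-- counting dict lookup = list count
lemma old_count_getD (old : List (Int × Int × String)) (t : Int × Int × String) :
    ((old.foldl (fun d t => d.insert t (d.getD t 0 + 1)) PySem.Dict.empty).getD t 0 : Int)
      = (old.count t : Int) := by
  simp [PySem.Dict.getD_foldl_insert_add_one, PySem.Dict.getD_empty]

-- grouping dict lookup = old intervals with that profile, profile projected away
lemma by_profile_getD (old : List (Int × Int × String)) (q : String) :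
    (old.foldl (fun d t => d.modify t.2.2 [] (· ++ [(t.1, t.2.1)])) PySem.Dict.empty).getD q []
      = (old.filter (fun u => u.2.2 == q)).map (fun u => (u.1, u.2.1)) := by
  have h := PySem.Dict.getD_foldl_modify_append
    (l := old.map (fun t => (t.2.2, (t.1, t.2.1)))) (d := PySem.Dict.empty) (c := q)
  rw [List.foldl_map] at h
  rw [h]
  simp only [PySem.Dict.getD_empty, List.nil_append]
  rw [List.filter_map, List.map_map]
  rfl

-- overlap: A's guarded inner scan equals B's fold over the grouped list
lemma overlap_inner (old : List (Int × Int × String)) (t : Int × Int × String) (acc : Int) :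
    old.foldl (fun acc u =>
        if t.2.2 ≠ u.2.2 then acc
        else acc + max 0 (min t.2.1 u.2.1 - max t.1 u.1)) acc
    = ((old.filter (fun u => u.2.2 == t.2.2)).map (fun u => (u.1, u.2.1))).foldl
        (fun acc u =>
          let ov := min t.2.1 u.2 - max t.1 u.1
          if ov > 0 then acc + ov else acc) acc := by
  induction old generalizing acc with
  | nil => simp
  | cons h tl ih =>
    simp only [List.foldl_cons, List.filter_cons]
    by_cases hp : t.2.2 = h.2.2
    · have hb : (h.2.2 == t.2.2) = true := by simp [hp]
      rw [hb]
      simp only [if_pos, List.map_cons, List.foldl_cons]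
      rw [ih]
      congr 1
      simp only [hp, ne_eq, not_true_eq_false, if_false]
      by_cases hov : 0 < min t.2.1 h.2.1 - max t.1 h.1
      · rw [if_pos hov]; omega
      · rw [if_neg hov]; omega
    · have hb : (h.2.2 == t.2.2) = false := by simp [Ne.symm hp]
      rw [hb]
      simp only [Bool.false_eq_true, if_false, ne_eq, hp, not_false_eq_true, if_pos]
      exact ih acc

-- ===== VERDICT (by name: the statement is the Claim_ definition above) =====
theorem layout_score_vs_prev_spec : Claim_equal_layout_score_vs_prev := by
  intro intervals prev_intervals _
  show layout_score_vs_prev intervals prev_intervals = _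
  simp only [layout_score_vs_prev, layout_score_vs_prev_alt, Prod.mk.injEq]
  refine ⟨?_, trivial, ?_, ?_⟩
  · -- exact
    apply PySem.List.foldl_congr_mem
    intro acc x _
    rw [exact_inner, old_count_getD]
  · -- prefix
    exact prefix_eq _ _ 0
  · -- overlap
    apply PySem.List.foldl_congr_mem
    intro acc x _
    rw [overlap_inner, by_profile_getD]
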